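-- pv_equiv track=rewrite | github.com/Kifrx/FP-KKA | puzzle_last.py | valid_moves_from
-- ===== SOURCE A (Python) =====
-- BOTOL_CAPACITY = 4
--
-- def valid_moves_from(state):
--     moves = []
--     n = len(state)
--     for i in range(n):
--         if not state[i]: continue
--         for j in range(n):
--             if i == j: continue
--             if len(state[j]) >= BOTOL_CAPACITY: continue
--             if not state[j] or state[j][-1] == state[i][-1]:
--                 moves.append((i, j))
--     return moves
-- ===== SOURCE B (Python) =====
-- BOTOL_CAPACITY = 4
--
-- def _merge(xs, ys):
--     out = []
--     a = b = 0
--     while a < len(xs) and b < len(ys):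
--         if xs[a] < ys[b]:
--             out.append(xs[a]); a += 1
--         else:
--             out.append(ys[b]); b += 1
--     out.extend(xs[a:])
--     out.extend(ys[b:])
--     return out
--
-- def valid_moves_from(state):
--     # One pass: empty (non-full) bottle indices, and non-full non-empty
--     # bottles bucketed by top colour, both in ascending index order.
--     empties = []
--     buckets = {}
--     for j, b in enumerate(state):
--         if len(b) >= BOTOL_CAPACITY:
--             continue
--         if not b:
--             empties.append(j)
--         else:
--             buckets.setdefault(b[-1], []).append(j)
--     moves = []
--     for i, b in enumerate(state):
--         if not b:
--             continue
--         for j in _merge(empties, buckets.get(b[-1], [])):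
--             if j != i:
--                 moves.append((i, j))
--     return moves
-- ===== Notes on version B (the rewrite author's own statement) =====
-- stated objective: faster
-- what changed: Instead of the nested all-pairs scan, B makes one indexing pass that collects empty non-full bottle indices and buckets non-full bottles by top colour, then emits each source's destinations by merging the two ascending index lists, so full and colour-mismatched bottles are never rescanned per source.
import Mathlib
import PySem

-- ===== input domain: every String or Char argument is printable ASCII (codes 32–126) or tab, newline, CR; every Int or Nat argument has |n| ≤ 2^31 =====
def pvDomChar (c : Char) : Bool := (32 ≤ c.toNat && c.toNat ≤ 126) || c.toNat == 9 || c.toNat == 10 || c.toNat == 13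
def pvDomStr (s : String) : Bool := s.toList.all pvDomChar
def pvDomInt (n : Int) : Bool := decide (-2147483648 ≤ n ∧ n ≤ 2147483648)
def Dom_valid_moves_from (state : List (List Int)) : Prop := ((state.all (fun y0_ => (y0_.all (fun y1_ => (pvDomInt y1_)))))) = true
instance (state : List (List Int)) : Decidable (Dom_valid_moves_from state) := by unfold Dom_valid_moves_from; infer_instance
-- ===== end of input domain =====

-- B replaces A's nested all-pairs scan by one bucketing pass (empties list + colour->indices dict)
-- and a sorted merge per source; same return value, alternative decomposition.


-- ===== PORT A =====
def valid_moves_from (state : List (List Int)) : List (Int × Int) :=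
  let n : Int := PySem.List.len state
  (PySem.List.pyRange 0 n).foldl (fun moves i =>
    if PySem.List.pyGetD state i [] = [] then moves
    else (PySem.List.pyRange 0 n).foldl (fun moves j =>
      if i = j then moves
      else if 4 ≤ (PySem.List.pyGetD state j []).length then moves
      else if PySem.List.pyGetD state j [] = [] ∨
              PySem.List.pyGetD (PySem.List.pyGetD state j []) (-1) 0 =
              PySem.List.pyGetD (PySem.List.pyGetD state i []) (-1) 0 then
        moves ++ [(i, j)]
      else moves) moves) []

-- ===== PORT B =====
-- two-pointer merge of two lists (Source B's _merge)
def pvMerge : List Int → List Int → List Int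
  | [], ys => ys
  | x :: xs, [] => x :: xs
  | x :: xs, y :: ys =>
    if x < y then x :: pvMerge xs (y :: ys) else y :: pvMerge (x :: xs) ys
termination_by xs ys => xs.length + ys.length

def valid_moves_from_alt (state : List (List Int)) : List (Int × Int) :=
  let eb := (PySem.List.enumerate state).foldl
    (fun (acc : List Int × PySem.Dict Int (List Int)) p =>
      if 4 ≤ p.2.length then acc
      else if p.2 = [] then (acc.1 ++ [p.1], acc.2)
      else (acc.1, acc.2.modify (PySem.List.pyGetD p.2 (-1) 0) [] (· ++ [p.1])))
    ([], PySem.Dict.empty)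
  (PySem.List.enumerate state).foldl (fun moves p =>
    if p.2 = [] then moves
    else (pvMerge eb.1 (eb.2.getD (PySem.List.pyGetD p.2 (-1) 0) [])).foldl
      (fun moves j => if j ≠ p.1 then moves ++ [(p.1, j)] else moves) moves) []

-- ===== PRECONDITION & SPEC =====
def Spec_valid_moves_from (state : List (List Int)) (out : List (Int × Int)) : Prop := out = valid_moves_from_alt state
instance (state : List (List Int)) (out : List (Int × Int)) : Decidable (Spec_valid_moves_from state out) := by unfold Spec_valid_moves_from; infer_instance

-- ===== CLAIM (what is proved, stated in full; the proofs are below) =====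
def Claim_equal_valid_moves_from : Prop := ∀ (state : List (List Int)), Dom_valid_moves_from state → Spec_valid_moves_from state (valid_moves_from state)

-- ===== LEMMAS AND PROOFS =====

-- destination predicates: empty (and non-full) bottle; non-full non-empty bottle with top colour c
def pvPE (state : List (List Int)) (j : Int) : Bool :=
  !(4 ≤ (PySem.List.pyGetD state j []).length) && (PySem.List.pyGetD state j [] == [])
def pvPC (state : List (List Int)) (c : Int) (j : Int) : Bool :=
  !(4 ≤ (PySem.List.pyGetD state j []).length) && !(PySem.List.pyGetD state j [] == []) &&
    (PySem.List.pyGetD (PySem.List.pyGetD state j []) (-1) 0 == c)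

lemma pvMerge_cons_left (x : Int) (xs ys : List Int) (h : ∀ y ∈ ys, x < y) :
    pvMerge (x :: xs) ys = x :: pvMerge xs ys := by
  cases ys with
  | nil => cases xs <;> simp [pvMerge]
  | cons y ys => simp [pvMerge, h y (by simp)]

lemma pvMerge_cons_right (x : Int) (xs ys : List Int) (h : ∀ y ∈ xs, x < y) :
    pvMerge xs (x :: ys) = x :: pvMerge xs ys := by
  cases xs with
  | nil => simp [pvMerge]
  | cons z zs =>
    have : ¬ z < x := by have := h z (by simp); omega
    simp [pvMerge, this]

lemma pvMerge_filter (l : List Int) (p q : Int → Bool) (hl : l.Pairwise (· < ·))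
    (hpq : ∀ x, ¬(p x = true ∧ q x = true)) :
    pvMerge (l.filter p) (l.filter q) = l.filter (fun x => p x || q x) := by
  induction l with
  | nil => simp [pvMerge]
  | cons x l ih =>
    have hlt : ∀ y ∈ l, x < y := fun y hy => (List.pairwise_cons.mp hl).1 y hy
    have hl' := (List.pairwise_cons.mp hl).2
    by_cases hp : p x = true
    · have hq : q x = false := by
        cases hq : q x
        · rfl
        · exact absurd ⟨hp, hq⟩ (hpq x)
      rw [List.filter_cons_of_pos hp, List.filter_cons_of_neg (by simp [hq]),
        pvMerge_cons_left x _ _ (fun y hy => hlt y (List.mem_of_mem_filter hy)),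
        List.filter_cons_of_pos (by simp [hp]), ih hl']
    · by_cases hq : q x = true
      · rw [List.filter_cons_of_neg (by simp [hp]), List.filter_cons_of_pos hq,
          pvMerge_cons_right x _ _ (fun y hy => hlt y (List.mem_of_mem_filter hy)),
          List.filter_cons_of_pos (by simp [hq]), ih hl']
      · rw [List.filter_cons_of_neg (by simp [hp]), List.filter_cons_of_neg (by simp [hq]),
          List.filter_cons_of_neg (by simp [hp, hq]), ih hl']

-- the building pass of B, over an arbitrary index list and accumulator
lemma pvBuild_inv (state : List (List Int)) (l : List Int) (es : List Int)
    (d : PySem.Dict Int (List Int)) :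
    (l.foldl (fun (acc : List Int × PySem.Dict Int (List Int)) j =>
        if 4 ≤ (PySem.List.pyGetD state j []).length then acc
        else if PySem.List.pyGetD state j [] = [] then (acc.1 ++ [j], acc.2)
        else (acc.1, acc.2.modify (PySem.List.pyGetD (PySem.List.pyGetD state j []) (-1) 0) []
          (· ++ [j]))) (es, d)).1
      = es ++ l.filter (pvPE state)
    ∧ ∀ c, (l.foldl (fun (acc : List Int × PySem.Dict Int (List Int)) j =>
        if 4 ≤ (PySem.List.pyGetD state j []).length then acc
        else if PySem.List.pyGetD state j [] = [] then (acc.1 ++ [j], acc.2)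
        else (acc.1, acc.2.modify (PySem.List.pyGetD (PySem.List.pyGetD state j []) (-1) 0) []
          (· ++ [j]))) (es, d)).2.getD c []
      = d.getD c [] ++ l.filter (pvPC state c) := by
  induction l generalizing es d with
  | nil => simp
  | cons j l ih =>
    by_cases hfull : 4 ≤ (PySem.List.pyGetD state j []).length
    · have h1 : pvPE state j = false := by simp [pvPE, hfull]
      have h2 : ∀ c, pvPC state c j = false := by intro c; simp [pvPC, hfull]
      simp only [List.foldl_cons, if_pos hfull, List.filter_cons, h1, h2,
        Bool.false_eq_true, if_false]
      exact ⟨(ih es d).1, fun c => (ih es d).2 c⟩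
    · by_cases hemp : PySem.List.pyGetD state j [] = []
      · have h1 : pvPE state j = true := by simp [pvPE, hemp]
        have h2 : ∀ c, pvPC state c j = false := by intro c; simp [pvPC, hemp]
        simp only [List.foldl_cons, if_neg hfull, if_pos hemp, List.filter_cons, h1, h2,
          Bool.false_eq_true, if_false, if_true]
        refine ⟨?_, fun c => (ih (es ++ [j]) d).2 c⟩
        rw [(ih (es ++ [j]) d).1]
        simp
      · have h1 : pvPE state j = false := by simp [pvPE, hemp]
        simp only [List.foldl_cons, if_neg hfull, if_neg hemp, List.filter_cons, h1,
          Bool.false_eq_true, if_false]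
        refine ⟨(ih es _).1, fun c => ?_⟩
        rw [(ih es _).2 c, PySem.Dict.getD_modify]
        by_cases hc : c = PySem.List.pyGetD (PySem.List.pyGetD state j []) (-1) 0
        · have h2 : pvPC state c j = true := by simp [pvPC, hfull, hemp, hc]
          rw [if_pos hc, h2]
          subst hc
          simp
        · have h2 : pvPC state c j = false := by
            have hne : (PySem.List.pyGetD (PySem.List.pyGetD state j []) (-1) 0 == c) = false := by
              simp only [beq_eq_false_iff_ne]
              exact fun h => hc h.symm
            simp [pvPC, hne]
          rw [if_neg hc, h2]
          simp
  
-- A's inner loop is filter + map over the destination indices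
lemma pvInnerA (state : List (List Int)) (i : Int) (l : List Int) (moves : List (Int × Int)) :
    (l.foldl (fun moves j =>
      if i = j then moves
      else if 4 ≤ (PySem.List.pyGetD state j []).length then moves
      else if PySem.List.pyGetD state j [] = [] ∨
              PySem.List.pyGetD (PySem.List.pyGetD state j []) (-1) 0 =
              PySem.List.pyGetD (PySem.List.pyGetD state i []) (-1) 0 then
        moves ++ [(i, j)]
      else moves) moves)
    = moves ++ (l.filter (fun j => !(j == i) &&
        (pvPE state j || pvPC state (PySem.List.pyGetD (PySem.List.pyGetD state i []) (-1) 0) j))).map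
        (fun j => (i, j)) := by
  have h : (fun (moves : List (Int × Int)) j =>
      if i = j then moves
      else if 4 ≤ (PySem.List.pyGetD state j []).length then moves
      else if PySem.List.pyGetD state j [] = [] ∨
              PySem.List.pyGetD (PySem.List.pyGetD state j []) (-1) 0 =
              PySem.List.pyGetD (PySem.List.pyGetD state i []) (-1) 0 then
        moves ++ [(i, j)]
      else moves)
      = fun moves j => if (!(j == i) &&
        (pvPE state j || pvPC state (PySem.List.pyGetD (PySem.List.pyGetD state i []) (-1) 0) j)) = true
        then moves ++ [(i, j)] else moves := by
    funext moves j
    by_cases hij : i = j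
    · simp [hij]
    · have hji : ¬ j = i := fun h => hij h.symm
      rw [if_neg hij]
      by_cases hfull : 4 ≤ (PySem.List.pyGetD state j []).length
      · simp [pvPE, pvPC, hfull]
      · rw [if_neg hfull]
        by_cases hemp : PySem.List.pyGetD state j [] = []
        · simp [pvPE, pvPC, hji, hemp]
        · by_cases heq : PySem.List.pyGetD (PySem.List.pyGetD state j []) (-1) 0 =
              PySem.List.pyGetD (PySem.List.pyGetD state i []) (-1) 0
          · simp [pvPE, pvPC, hji, hfull, hemp, heq]
          · simp [pvPE, pvPC, hji, hfull, hemp, heq]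
  rw [h, PySem.List.foldl_append_if]

-- B's inner loop is filter + map
lemma pvInnerB (i : Int) (l : List Int) (moves : List (Int × Int)) :
    (l.foldl (fun moves j => if j ≠ i then moves ++ [(i, j)] else moves) moves)
    = moves ++ (l.filter (fun j => !(j == i))).map (fun j => (i, j)) := by
  have h : (fun (moves : List (Int × Int)) j => if j ≠ i then moves ++ [(i, j)] else moves)
      = fun moves j => if (!(j == i)) = true then moves ++ [(i, j)] else moves := by
    funext moves j
    by_cases hij : j = i <;> simp [hij]
  rw [h, PySem.List.foldl_append_if]

-- ===== VERDICT (by name: the statement is the Claim_ definition above) =====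
theorem valid_moves_from_spec : Claim_equal_valid_moves_from := by
  intro state _
  unfold Spec_valid_moves_from valid_moves_from valid_moves_from_alt
  rw [PySem.List.enumerate_eq_map_pyRange state [], List.foldl_map, List.foldl_map]
  simp only []
  congr 1
  funext moves i
  by_cases hi : PySem.List.pyGetD state i [] = []
  · rw [if_pos hi, if_pos hi]
  · rw [if_neg hi, if_neg hi, pvInnerA,
      (pvBuild_inv state (PySem.List.pyRange 0 (PySem.List.len state)) [] PySem.Dict.empty).1,
      (pvBuild_inv state (PySem.List.pyRange 0 (PySem.List.len state)) [] PySem.Dict.empty).2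
        (PySem.List.pyGetD (PySem.List.pyGetD state i []) (-1) 0),
      List.nil_append, PySem.Dict.getD_empty, List.nil_append,
      pvMerge_filter _ _ _ (PySem.List.pairwise_lt_pyRange_one 0 _)
        (by intro x hx
            obtain ⟨h1, h2⟩ := hx
            simp [pvPE] at h1
            simp [pvPC] at h2
            exact h2.1.2 h1.2),
      pvInnerB, List.filter_filter]
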